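-- pv_equiv track=rewrite | github.com/Kasperpk/Algorithms-data-structures | algorithms/leet code problems/sorting and searching/apartments.py | apartments
-- ===== SOURCE A (Python) =====
-- def merge_sort(numbers):
--     if len(numbers) <= 1:
--         return numbers
--
--     middle = len(numbers)//2
--     left_half = numbers[:middle]
--     right_half = numbers[middle:]
--
--     sorted_left = merge_sort(left_half)
--     sorted_right = merge_sort(right_half)
--
--     return merge(sorted_left, sorted_right)
--
-- def merge(left, right):
--     result = []
--
--     # pointers to keep track of where to insert numbers in array
--     index = pointer = 0
--
--     while index < len(left) and pointer < len(right):
--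
--         if left[index] < right[pointer]:
--             result.append(left[index])
--             index += 1
--         else:
--             result.append(right[pointer])
--             pointer += 1
--
--     result.extend(left[index:])
--     result.extend(right[pointer:])
--
--     return result
--
-- def apartments(allowed_difference, desired_sizes, apartment_sizes):
--
--     sorted_apartments = merge_sort(apartment_sizes)
--     sorted_applications = merge_sort(desired_sizes)
--     number_of_apartments_occupied = 0
--     apartment_index = 0
--     application_index = 0
--     while sorted_apartments and sorted_applications:
--             difference = sorted_apartments[apartment_index] - sorted_applications[application_index]
--             if abs(difference) <= allowed_difference:
--                 number_of_apartments_occupied = number_of_apartments_occupied + 1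
--                 sorted_apartments.remove(sorted_apartments[apartment_index])
--                 sorted_applications.remove(sorted_applications[application_index])
--                 application_index = 0
--             else:
--                 # if we have reached the final element in applications
--                 # then reset the application index and progress the
--                 # apartment
--                 if application_index + 1 > len(sorted_applications) - 1:
--                     application_index = 0
--                     sorted_apartments.remove(sorted_apartments[apartment_index])
--
--                 else:
--                     application_index += 1
--
--     return number_of_apartments_occupied
-- ===== SOURCE B (Python) =====
-- def apartments(allowed_difference, desired_sizes, apartment_sizes):
--     apts = sorted(apartment_sizes)
--     apps = sorted(desired_sizes)
--     count = 0
--     i = j = 0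
--     while i < len(apts) and j < len(apps):
--         if abs(apts[i] - apps[j]) <= allowed_difference:
--             count += 1
--             i += 1
--             j += 1
--         elif apps[j] < apts[i]:
--             j += 1
--         else:
--             i += 1
--     return count
-- ===== Notes on version B (the rewrite author's own statement) =====
-- stated objective: faster
-- what changed: Replaced the rescan-from-the-start matching loop over lists mutated with remove() by a single two-pointer greedy sweep over both sorted arrays.
import Mathlib
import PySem

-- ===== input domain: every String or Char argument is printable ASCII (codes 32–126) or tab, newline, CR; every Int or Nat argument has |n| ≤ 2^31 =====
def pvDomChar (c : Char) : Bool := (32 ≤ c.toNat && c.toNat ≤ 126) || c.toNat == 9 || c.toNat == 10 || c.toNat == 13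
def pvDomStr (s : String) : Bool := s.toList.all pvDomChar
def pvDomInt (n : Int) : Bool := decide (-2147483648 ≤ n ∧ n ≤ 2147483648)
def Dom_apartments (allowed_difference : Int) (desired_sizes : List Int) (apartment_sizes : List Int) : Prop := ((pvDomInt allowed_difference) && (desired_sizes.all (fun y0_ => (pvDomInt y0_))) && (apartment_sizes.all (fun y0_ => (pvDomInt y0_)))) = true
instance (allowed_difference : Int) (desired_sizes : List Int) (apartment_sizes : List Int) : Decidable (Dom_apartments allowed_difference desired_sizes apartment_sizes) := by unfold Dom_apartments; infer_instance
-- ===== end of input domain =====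

-- B replaces A's rescan-from-the-start matching over lists mutated with remove() by a
-- single two-pointer greedy sweep over both sorted arrays (asymptotically faster).
-- A may mutate argument lists of length <= 1 in place (merge_sort returns them unchanged);
-- the equivalence proved here is about the return value only.


-- ===== PORT A =====

-- A's `merge` (while loop with two pointers appending the smaller head, then extending
-- with the remainders) as the obvious structural recursion over the same two remainders.
def mergeA : List Int → List Int → List Int
  | [], right => right
  | left, [] => left
  | a :: l, b :: r =>
      if a < b then a :: mergeA l (b :: r) else b :: mergeA (a :: l) r
termination_by l r => l.length + r.length

-- A's `merge_sort`; `numbers[:middle]` / `numbers[middle:]` with 0 ≤ middle ≤ len are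
-- exactly take/drop.
def mergeSortA (numbers : List Int) : List Int :=
  if _h : numbers.length ≤ 1 then numbers
  else
    let middle := numbers.length / 2
    mergeA (mergeSortA (numbers.take middle)) (mergeSortA (numbers.drop middle))
termination_by numbers.length
decreasing_by
  · simp only [List.length_take]; omega
  · simp only [List.length_drop]; omega

-- Python list.remove(v): drop the first occurrence of v (total guard: unchanged if absent,
-- which A never hits — the removed value is always an element).
def removeF (v : Int) : List Int → List Int
  | [] => []
  | x :: xs => if x = v then xs else x :: removeF v xs

theorem length_removeF_le (v : Int) (l : List Int) : (removeF v l).length ≤ l.length := by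
  induction l with
  | nil => simp [removeF]
  | cons x xs ih =>
      simp only [removeF]; split
      · simp
      · simpa using ih

-- A's while loop; apartment_index is the constant 0 (A never increments it), so
-- sorted_apartments[0] is the head; application_index is j; apps[j] read with getD
-- (j < apps.length in every reachable state, starting from j = 0).
def aLoop (k : Int) : List Int → List Int → Nat → Int → Int
  | [], _, _, count => count
  | _ :: _, [], _, count => count
  | x :: xs, y :: ys, j, count =>
      let v := (y :: ys).getD j 0
      if |x - v| ≤ k then
        aLoop k (removeF x (x :: xs)) (removeF v (y :: ys)) 0 (count + 1)
      else if j + 1 > (y :: ys).length - 1 then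
        aLoop k (removeF x (x :: xs)) (y :: ys) 0 count
      else
        aLoop k (x :: xs) (y :: ys) (j + 1) count
termination_by apts apps j _ => apts.length * (apps.length + 1) + (apps.length - j)
decreasing_by
  · have h1 := length_removeF_le ((y :: ys).getD j 0) (y :: ys)
    simp only [removeF]
    have h2 : (removeF ((y :: ys).getD j 0) (y :: ys)).length ≤ ys.length + 1 := by
      simpa using h1
    calc xs.length * ((removeF ((y :: ys).getD j 0) (y :: ys)).length + 1)
          + ((removeF ((y :: ys).getD j 0) (y :: ys)).length - 0)
        ≤ xs.length * (ys.length + 1 + 1) + (ys.length + 1) := by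
          have := Nat.mul_le_mul_left xs.length (Nat.add_le_add_right h2 1)
          omega
      _ < (x :: xs).length * ((y :: ys).length + 1) + ((y :: ys).length - j) := by
          simp only [List.length_cons]; ring_nf; omega
  · simp only [removeF]
    calc xs.length * ((y :: ys).length + 1) + ((y :: ys).length - 0)
        < (xs.length + 1) * ((y :: ys).length + 1) := by
          simp only [List.length_cons]; ring_nf; omega
      _ ≤ (x :: xs).length * ((y :: ys).length + 1) + ((y :: ys).length - j) := by
          simp only [List.length_cons]; omega
  · rename_i _hlt hle
    have hj : j < (y :: ys).length := by simp only [List.length_cons] at hle ⊢; omega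
    exact Nat.add_lt_add_left (by omega) _

def apartments (allowed_difference : Int) (desired_sizes : List Int) (apartment_sizes : List Int) : Int :=
  let sortedApartments := mergeSortA apartment_sizes
  let sortedApplications := mergeSortA desired_sizes
  aLoop allowed_difference sortedApartments sortedApplications 0 0

-- ===== PORT B =====

-- B's while loop over the two sorted arrays with pointers i, j, transcribed as the
-- structural recursion on the two unread suffixes, same accumulator `count`.
def bLoop (k : Int) : List Int → List Int → Int → Int
  | [], _, count => count
  | _ :: _, [], count => count
  | x :: xs, y :: ys, count =>
      if |x - y| ≤ k then bLoop k xs ys (count + 1)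
      else if y < x then bLoop k (x :: xs) ys count
      else bLoop k xs (y :: ys) count
termination_by apts apps _ => apts.length + apps.length

def apartments_alt (allowed_difference : Int) (desired_sizes : List Int) (apartment_sizes : List Int) : Int :=
  let apts := PySem.List.sorted apartment_sizes (fun x => x) false
  let apps := PySem.List.sorted desired_sizes (fun x => x) false
  bLoop allowed_difference apts apps 0

-- ===== PRECONDITION & SPEC =====
def Spec_apartments (allowed_difference : Int) (desired_sizes : List Int) (apartment_sizes : List Int) (out : Int) : Prop := out = apartments_alt allowed_difference desired_sizes apartment_sizes
instance (allowed_difference : Int) (desired_sizes : List Int) (apartment_sizes : List Int) (out : Int) : Decidable (Spec_apartments allowed_difference desired_sizes apartment_sizes out) := by unfold Spec_apartments; infer_instance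

-- ===== CLAIM (what is proved, stated in full; the proofs are below) =====
def Claim_equal_apartments : Prop := ∀ (allowed_difference : Int) (desired_sizes : List Int) (apartment_sizes : List Int), Dom_apartments allowed_difference desired_sizes apartment_sizes → Spec_apartments allowed_difference desired_sizes apartment_sizes (apartments allowed_difference desired_sizes apartment_sizes)

-- ===== LEMMAS AND PROOFS =====

theorem mergeA_perm (l r : List Int) : (mergeA l r).Perm (l ++ r) := by
  fun_induction mergeA l r with
  | case1 => simp
  | case2 => simp
  | case3 a l b r h ih =>
      simpa using ih.cons a
  | case4 a l b r h ih =>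
      refine (ih.cons b).trans ?_
      exact (List.perm_middle).symm

theorem mergeA_sorted (l r : List Int) (hl : l.Pairwise (· ≤ ·)) (hr : r.Pairwise (· ≤ ·)) :
    (mergeA l r).Pairwise (· ≤ ·) := by
  fun_induction mergeA l r with
  | case1 => exact hr
  | case2 => exact hl
  | case3 a l b r h ih =>
      rw [List.pairwise_cons] at hl ⊢
      refine ⟨?_, ih hl.2 hr⟩
      intro z hz
      rcases List.mem_append.mp ((mergeA_perm l (b :: r)).mem_iff.mp hz) with h1 | h1
      · exact hl.1 z h1
      · rw [List.pairwise_cons] at hr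
        rcases List.mem_cons.mp h1 with rfl | h2
        · exact le_of_lt h
        · exact le_trans (le_of_lt h) (hr.1 z h2)
  | case4 a l b r h ih =>
      rw [List.pairwise_cons] at hr ⊢
      refine ⟨?_, ih hl hr.2⟩
      intro z hz
      rcases List.mem_append.mp ((mergeA_perm (a :: l) r).mem_iff.mp hz) with h1 | h1
      · rw [List.pairwise_cons] at hl
        rcases List.mem_cons.mp h1 with rfl | h2
        · omega
        · exact le_trans (by omega) (hl.1 z h2)
      · exact hr.1 z h1

theorem mergeSortA_perm (l : List Int) : (mergeSortA l).Perm l := by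
  fun_induction mergeSortA l with
  | case1 => exact List.Perm.refl _
  | case2 l h middle ih1 ih2 =>
      refine ((mergeA_perm _ _).trans ?_)
      calc (mergeSortA (l.take middle) ++ mergeSortA (l.drop middle)).Perm
            (l.take middle ++ l.drop middle) := ih1.append ih2
        _ = l := List.take_append_drop middle l

theorem mergeSortA_sorted (l : List Int) : (mergeSortA l).Pairwise (· ≤ ·) := by
  fun_induction mergeSortA l with
  | case1 l h =>
      match l with
      | [] => simp
      | [x] => simp
      | x :: y :: t => simp at h
  | case2 l h middle ih1 ih2 => exact mergeA_sorted _ _ ih1 ih2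

theorem mergeSortA_eq_sorted (l : List Int) :
    mergeSortA l = PySem.List.sorted l (fun x => x) false := by
  exact (PySem.List.sorted_id_eq_of_perm_of_pairwise l (mergeSortA l) (mergeSortA_perm l) (mergeSortA_sorted l)).symm

-- first value within k of x during one scan of the applications suffix
def scanA (k x : Int) : List Int → Option Int
  | [] => none
  | y :: ys => if |x - y| ≤ k then some y else scanA k x ys

theorem scanA_some {k x v : Int} {l : List Int} (h : scanA k x l = some v) : |x - v| ≤ k := by
  induction l with
  | nil => simp [scanA] at h
  | cons y ys ih =>
      simp only [scanA] at h
      split at h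
      · cases h; assumption
      · exact ih h

theorem scanA_none {k x : Int} {l : List Int} (h : ∀ a ∈ l, x + k < a) : scanA k x l = none := by
  induction l with
  | nil => rfl
  | cons y ys ih =>
      have hy := h y (List.mem_cons_self ..)
      simp only [scanA, if_neg (by rw [abs_le]; omega : ¬ |x - y| ≤ k)]
      exact ih (fun a ha => h a (List.mem_cons_of_mem _ ha))

theorem removeF_cons_self (x : Int) (xs : List Int) : removeF x (x :: xs) = xs := by
  simp [removeF]

theorem getD_append_len : ∀ (pre : List Int) (y : Int) (ys : List Int),
    (pre ++ y :: ys).getD pre.length 0 = y := by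
  intro pre
  induction pre with
  | nil => simp
  | cons p pre _ => simp

theorem aLoop_nil_right (k : Int) (apts : List Int) (j : Nat) (c : Int) :
    aLoop k apts [] j c = c := by
  cases apts <;> simp [aLoop]

theorem aLoop_app (k x : Int) (xs : List Int) (apps : List Int) (h : apps ≠ []) (j : Nat) (c : Int) :
    aLoop k (x :: xs) apps j c =
      (let v := apps.getD j 0
       if |x - v| ≤ k then
         aLoop k (removeF x (x :: xs)) (removeF v apps) 0 (c + 1)
       else if j + 1 > apps.length - 1 then
         aLoop k (removeF x (x :: xs)) apps 0 c
       else
         aLoop k (x :: xs) apps (j + 1) c) := by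
  match apps with
  | [] => exact absurd rfl h
  | z :: zs => rw [aLoop]

-- one full scan of A's inner index walk
theorem aLoop_scan (k x : Int) (xs : List Int) :
    ∀ (ys : List Int) (y : Int) (pre : List Int) (c : Int), (∀ p ∈ pre, ¬ |x - p| ≤ k) →
    aLoop k (x :: xs) (pre ++ y :: ys) pre.length c =
      match scanA k x (y :: ys) with
      | some v => aLoop k xs (removeF v (pre ++ y :: ys)) 0 (c + 1)
      | none => aLoop k xs (pre ++ y :: ys) 0 c := by
  intro ys
  induction ys with
  | nil =>
      intro y pre c _
      rw [aLoop_app k x xs _ (by simp) _ c]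
      simp only [getD_append_len]
      by_cases hm : |x - y| ≤ k
      · simp [hm, scanA, removeF_cons_self]
      · have hc : pre.length + 1 > (pre ++ [y]).length - 1 := by simp
        simp [hm, scanA, removeF_cons_self]
  | cons y' ys' ih =>
      intro y pre c hpre
      rw [aLoop_app k x xs _ (by simp) _ c]
      simp only [getD_append_len]
      by_cases hm : |x - y| ≤ k
      · simp [hm, scanA, removeF_cons_self]
      · have hc : ¬ (pre.length + 1 > (pre ++ y :: y' :: ys').length - 1) := by
          simp [List.length_append]
        rw [if_neg hm, if_neg hc]
        have hsh : pre ++ y :: y' :: ys' = (pre ++ [y]) ++ y' :: ys' := by simp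
        rw [hsh]
        have hlen : pre.length + 1 = (pre ++ [y]).length := by simp
        rw [hlen, ih y' (pre ++ [y]) c (by
          intro p hp
          rcases List.mem_append.mp hp with h1 | h1
          · exact hpre p h1
          · have hpy : p = y := by simpa using h1
            rw [hpy]; exact hm)]
        simp [scanA, hm]

-- an application strictly below every apartment's window is never matched nor removed
theorem aLoop_drop_small (k y : Int) :
    ∀ (apts : List Int), (∀ a ∈ apts, y + k < a) →
    ∀ (Z : List Int) (c : Int), aLoop k apts (y :: Z) 0 c = aLoop k apts Z 0 c := by
  intro apts
  induction apts with
  | nil => intro _ Z c; simp [aLoop]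
  | cons x xs ih =>
      intro hall Z c
      have hx : y + k < x := hall x (List.mem_cons_self ..)
      have hm : ¬ |x - y| ≤ k := by rw [abs_le]; omega
      have hxs : ∀ a ∈ xs, y + k < a := fun a ha => hall a (List.mem_cons_of_mem _ ha)
      have hL := aLoop_scan k x xs Z y [] c (by simp)
      simp only [List.nil_append, List.length_nil] at hL
      rw [hL]
      cases Z with
      | nil =>
          simp only [scanA, if_neg hm]
          rw [ih hxs [] c, aLoop_nil_right, aLoop_nil_right]
      | cons z zs =>
          have hR := aLoop_scan k x xs zs z [] c (by simp)
          simp only [List.nil_append, List.length_nil] at hR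
          rw [hR]
          have hsc : scanA k x (y :: z :: zs) = scanA k x (z :: zs) := by
            simp [scanA, hm]
          rw [hsc]
          cases hscan : scanA k x (z :: zs) with
          | none => simp only; exact ih hxs (z :: zs) c
          | some v =>
              have hv : v ≠ y := by
                have := scanA_some hscan
                rw [abs_le] at this
                omega
              simp only
              have hrm : removeF v (y :: z :: zs) = y :: removeF v (z :: zs) := by
                simp [removeF, Ne.symm hv]
              rw [hrm]
              exact ih hxs (removeF v (z :: zs)) (c + 1)

theorem aLoop_eq_bLoop (k : Int) :
    ∀ (apts : List Int), apts.Pairwise (· ≤ ·) →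
    ∀ (apps : List Int), apps.Pairwise (· ≤ ·) →
    ∀ (c : Int), aLoop k apts apps 0 c = bLoop k apts apps c := by
  intro apts
  induction apts with
  | nil => intro _ apps _ c; cases apps <;> simp [aLoop, bLoop]
  | cons x xs ihA =>
      intro hA apps
      induction apps with
      | nil => intro _ c; simp [bLoop, aLoop_nil_right]
      | cons y ys ihB =>
          intro hB c
          have hL := aLoop_scan k x xs ys y [] c (by simp)
          simp only [List.nil_append, List.length_nil] at hL
          by_cases hm : |x - y| ≤ k
          · rw [hL]
            simp only [scanA, if_pos hm, removeF_cons_self]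
            rw [ihA (List.Pairwise.of_cons hA) ys (List.Pairwise.of_cons hB) (c + 1)]
            rw [bLoop, if_pos hm]
          · by_cases hlt : y < x
            · have hyk : y + k < x := by
                rw [abs_le] at hm
                push Not at hm
                omega
              have hall : ∀ a ∈ x :: xs, y + k < a := by
                intro a ha
                rcases List.mem_cons.mp ha with rfl | h1
                · exact hyk
                · have := (List.pairwise_cons.mp hA).1 a h1
                  omega
              rw [aLoop_drop_small k y (x :: xs) hall ys c]
              rw [ihB (List.Pairwise.of_cons hB) c]
              rw [bLoop, if_neg hm, if_pos hlt]
            · have hgt : ∀ a ∈ y :: ys, x + k < a := by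
                intro a ha
                have hxy : x + k < y := by rw [abs_le] at hm; push Not at hm; omega
                rcases List.mem_cons.mp ha with rfl | h1
                · exact hxy
                · have := (List.pairwise_cons.mp hB).1 a h1
                  omega
              rw [hL, scanA_none hgt]
              simp only
              rw [ihA (List.Pairwise.of_cons hA) (y :: ys) hB c]
              rw [bLoop, if_neg hm, if_neg hlt]

-- ===== VERDICT (by name: the statement is the Claim_ definition above) =====
theorem apartments_spec : Claim_equal_apartments := by
  intro k des aps _
  unfold Spec_apartments apartments apartments_alt
  rw [← mergeSortA_eq_sorted, ← mergeSortA_eq_sorted]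
  exact aLoop_eq_bLoop k _ (mergeSortA_sorted aps) _ (mergeSortA_sorted des) 0
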